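-- pv_equiv track=rewrite | github.com/ChristianHallerX/Python_Coding | Blind75/greedyPond.py | greedyPond
-- ===== SOURCE A (Python) =====
-- def greedyPond(fish, baits):
--     # Sort fish and baits in descending order (largest to smallest)
--     fish.sort(reverse=True)
--     baits.sort(reverse=True)
--
--     # Initialize the number of fish caught
--     fishCaught = 0
--
--     # Initialize bait index and create a list to track remaining uses for each bait.
--     baitIndex = 0
--     baitUse = [3] * len(baits)  # Each bait can be used up to 3 times.
--
--     # Loop through each fish, trying to catch it using available baits.
--     for fishSize in fish:
--
--         # Try to find an eligible bait for the current fish.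
--         while baitIndex < len(baits):
--
--             # Check if the current bait still has remaining uses.
--             if baitUse[baitIndex] > 0:
--
--                 # If the bait is smaller than the fish, catch the fish.
--                 if baits[baitIndex] < fishSize:
--                     fishCaught += 1  # Increment count of caught fish.
--                     baitUse[baitIndex] -= 1  # Decrease the bait's remaining uses.
--                     break  # Move on to the next fish.
--                 else:
--                     # If the bait is too large, try the next bait.
--                     baitIndex += 1
--             else:
--                 # If the current bait is depleted, move to the next one.
--                 baitIndex += 1
--
--     return fishCaught
-- ===== SOURCE B (Python) =====
-- def greedyPond(fish, baits):
--     # Same in-place sorts as A (mutation preserved). Instead of simulating the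
--     # matching, evaluate the Hall-style feasibility condition: the k largest
--     # fish are all catchable iff for every i <= k (1-indexed, descending fish)
--     #   3 * (#baits smaller than fish i)  >=  k - i + 1,
--     # i.e. k <= min_{i<=k} (3*c_i + i - 1).  The counts c_i are found by binary
--     # search in the sorted baits; the running minimum makes one pass over fish.
--     fish.sort(reverse=True)
--     baits.sort(reverse=True)
--     m = len(baits)
--     bound = 3 * m + len(fish)   # +infinity stand-in (never binding)
--     caught = 0
--     k = 0
--     for f in fish:
--         k += 1
--         # binary search: first index lo with baits[lo] < f (baits descending)
--         lo, hi = 0, m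
--         while lo < hi:
--             mid = (lo + hi) // 2
--             if baits[mid] >= f:
--                 lo = mid + 1
--             else:
--                 hi = mid
--         c = m - lo              # number of baits strictly smaller than f
--         bound = min(bound, 3 * c + k - 1)
--         if k <= bound:
--             caught = k
--     return caught
-- ===== Notes on version B (the rewrite author's own statement) =====
-- stated objective: alternative
-- what changed: Instead of simulating the matching with a bait pointer and per-bait use counters, B evaluates a Hall-style feasibility condition: the k largest fish are all catchable iff 3*(#baits < fish_i) >= k-i+1 for every i <= k, computed with one binary search per fish and a running minimum.
import Mathlib
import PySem

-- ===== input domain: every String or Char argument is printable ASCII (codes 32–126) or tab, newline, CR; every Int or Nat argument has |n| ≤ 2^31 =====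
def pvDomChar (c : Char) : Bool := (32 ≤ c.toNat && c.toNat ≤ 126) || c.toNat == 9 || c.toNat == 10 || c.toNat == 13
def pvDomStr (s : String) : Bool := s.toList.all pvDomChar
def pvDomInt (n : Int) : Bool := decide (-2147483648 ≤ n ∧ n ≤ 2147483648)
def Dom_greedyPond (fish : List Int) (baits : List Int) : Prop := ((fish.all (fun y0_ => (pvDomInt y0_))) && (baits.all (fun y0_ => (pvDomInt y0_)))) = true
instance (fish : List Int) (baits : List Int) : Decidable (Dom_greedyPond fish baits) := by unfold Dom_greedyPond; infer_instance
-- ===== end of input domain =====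

-- B replaces A's matching simulation (bait pointer + per-bait use counters) by a
-- Hall-style feasibility count: the k largest fish are all catchable iff for every
-- i ≤ k, 3·(#baits < fish i) ≥ k - i + 1; B evaluates this with one binary search
-- per fish and a running minimum (objective: alternative). Both Pythons sort their
-- arguments in place identically; the equivalence proved is about the RETURN value.

-- ===== PORT A =====
-- A's inner `while baitIndex < len(baits)` loop; state (fishCaught, baitIndex, baitUse)
def pondLoopA (baits : List Int) (fishSize : Int) (i : Nat) (use : List Int) (caught : Int) :
    Int × Nat × List Int :=
  if _h : i < baits.length then
    if use.getD i 0 > 0 then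
      if baits.getD i 0 < fishSize then
        (caught + 1, i, use.set i (use.getD i 0 - 1))
      else pondLoopA baits fishSize (i + 1) use caught
    else pondLoopA baits fishSize (i + 1) use caught
  else (caught, i, use)
termination_by baits.length - i

def greedyPond (fish : List Int) (baits : List Int) : Int :=
  let fishS := PySem.List.sorted fish (fun x => x) true
  let baitsS := PySem.List.sorted baits (fun x => x) true
  let s := fishS.foldl
    (fun (st : Int × Nat × List Int) fishSize =>
      pondLoopA baitsS fishSize st.2.1 st.2.2 st.1)
    (0, 0, List.replicate baitsS.length 3)
  s.1

-- ===== PORT B =====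
-- B's inner `while lo < hi` binary search: first index lo with baits[lo] < f
def bsearchB (baits : List Int) (f : Int) (lo hi : Nat) : Nat :=
  if _h : lo < hi then
    let mid := (lo + hi) / 2
    if baits.getD mid 0 ≥ f then bsearchB baits f (mid + 1) hi
    else bsearchB baits f lo mid
  else lo
termination_by hi - lo
decreasing_by all_goals omega

def greedyPond_alt (fish : List Int) (baits : List Int) : Int :=
  let fishS := PySem.List.sorted fish (fun x => x) true
  let baitsS := PySem.List.sorted baits (fun x => x) true
  let m := baitsS.length
  -- state (bound, caught, k)
  let s := fishS.foldl
    (fun (st : Int × Int × Int) f =>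
      let k := st.2.2 + 1
      let lo := bsearchB baitsS f 0 m
      let c : Int := (m : Int) - (lo : Int)
      let bound := min st.1 (3 * c + k - 1)
      let caught := if k ≤ bound then k else st.2.1
      (bound, caught, k))
    (3 * (m : Int) + (fishS.length : Int), 0, 0)
  s.2.1

-- ===== PRECONDITION & SPEC =====
def Spec_greedyPond (fish : List Int) (baits : List Int) (out : Int) : Prop := out = greedyPond_alt fish baits
instance (fish : List Int) (baits : List Int) (out : Int) : Decidable (Spec_greedyPond fish baits out) := by unfold Spec_greedyPond; infer_instance

-- ===== CLAIM (what is proved, stated in full; the proofs are below) =====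
def Claim_equal_greedyPond : Prop := ∀ (fish : List Int) (baits : List Int), Dom_greedyPond fish baits → Spec_greedyPond fish baits (greedyPond fish baits)

-- ===== LEMMAS AND PROOFS =====

-- Proof-side reference program: A's greedy expressed as one pointer over the
-- baits repeated ×3.  Step 1 proves A = pondRef, step 2 proves pondRef = B.
def advB (baits3 : List Int) (f : Int) (j : Nat) : Nat :=
  if _h : j < baits3.length then
    if baits3.getD j 0 ≥ f then advB baits3 f (j + 1) else j
  else j
termination_by baits3.length - j

def pondRef (fish : List Int) (baits : List Int) : Int :=
  let fishS := PySem.List.sorted fish (fun x => x) true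
  let baitsS := PySem.List.sorted baits (fun x => x) true
  let baits3 := baitsS.flatMap (fun b => [b, b, b])
  let s := fishS.foldl
    (fun (st : Int × Nat) f =>
      let j := advB baits3 f st.2
      if j < baits3.length then (st.1 + 1, j + 1) else (st.1, j))
    (0, 0)
  s.1

-- ---------- Step 1: A = pondRef (invariant between A's counter state and the pointer) ----------
def PondInv (bs : List Int) (stA : Int × Nat × List Int) (stB : Int × Nat) : Prop :=
  stA.1 = stB.1 ∧
  ((∃ p u, p.length = stA.2.1 ∧ 0 ≤ u ∧ u ≤ 3 ∧ stA.2.1 < bs.length ∧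
      stA.2.2 = p ++ u :: List.replicate (bs.length - stA.2.1 - 1) 3 ∧
      (stB.2 : Int) = 3 * stA.2.1 + (3 - u)) ∨
    (stA.2.1 = bs.length ∧ stB.2 = 3 * bs.length))

lemma length_baits3 (bs : List Int) : (bs.flatMap (fun b => [b, b, b])).length = 3 * bs.length := by
  induction bs with
  | nil => simp
  | cons b t ih => simp [List.flatMap_cons, ih]; omega

lemma getD_baits3 (bs : List Int) (i r : Nat) (hi : i < bs.length) (hr : r < 3) :
    (bs.flatMap (fun b => [b, b, b])).getD (3 * i + r) 0 = bs.getD i 0 := by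
  induction bs generalizing i with
  | nil => simp at hi
  | cons b t ih =>
    cases i with
    | zero =>
      interval_cases r <;> simp [List.flatMap_cons]
    | succ i' =>
      have h3 : 3 * (i' + 1) + r = (3 * i' + r) + 1 + 1 + 1 := by ring
      simp only [List.flatMap_cons, h3, List.cons_append, List.getD_cons_succ]
      exact ih i' (by simpa using hi)

lemma advB_ge (bs3 : List Int) (f : Int) (j : Nat) (hj : j < bs3.length)
    (hge : bs3.getD j 0 ≥ f) : advB bs3 f j = advB bs3 f (j + 1) := by
  rw [advB, dif_pos hj, if_pos hge]

lemma advB_skip (bs3 : List Int) (f : Int) (j : Nat) :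
    ∀ k, j + k ≤ bs3.length → (∀ m, m < k → bs3.getD (j + m) 0 ≥ f) →
    advB bs3 f j = advB bs3 f (j + k) := by
  intro k
  induction k generalizing j with
  | zero => intro _ _; rfl
  | succ k' ih =>
    intro hle hge
    have h0 : bs3.getD (j + 0) 0 ≥ f := hge 0 (by omega)
    rw [advB_ge bs3 f j (by omega) (by simpa using h0)]
    have := ih (j + 1) (by omega) (fun m hm => by
      have := hge (m + 1) (by omega)
      simpa [Nat.add_assoc, Nat.add_comm 1 m] using this)
    rw [this]; ring_nf

lemma getD_append_len (p : List Int) (v : Int) (rest : List Int) :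
    (p ++ v :: rest).getD p.length 0 = v := by
  induction p with
  | nil => simp
  | cons a t ih => simpa using ih

lemma set_append_len (p : List Int) (v w : Int) (rest : List Int) :
    (p ++ v :: rest).set p.length w = p ++ w :: rest := by
  induction p with
  | nil => simp
  | cons a t ih => simpa using ih

lemma pond_step_base (bs : List Int) (f c : Int) (use : List Int) (i j : Nat)
    (hi : i = bs.length) (hj : j = 3 * bs.length) :
    PondInv bs (pondLoopA bs f i use c)
      (let j' := advB (bs.flatMap (fun b => [b, b, b])) f j
       if j' < (bs.flatMap (fun b => [b, b, b])).length then (c + 1, j' + 1) else (c, j')) := by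
  have hlen3 := length_baits3 bs
  rw [pondLoopA, dif_neg (by omega)]
  have hadv : advB (bs.flatMap (fun b => [b, b, b])) f j = j := by
    rw [advB, dif_neg (by omega)]
  simp only [hadv, if_neg (show ¬ j < (bs.flatMap (fun b => [b, b, b])).length by omega)]
  exact ⟨rfl, Or.inr ⟨hi, hj⟩⟩

lemma pond_step_aux (bs : List Int) (f : Int) :
    ∀ (d : Nat) (i : Nat) (c : Int) (use : List Int) (j : Nat),
      bs.length - i ≤ d →
      ((∃ p u, p.length = i ∧ 0 ≤ u ∧ u ≤ 3 ∧ i < bs.length ∧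
          use = p ++ u :: List.replicate (bs.length - i - 1) 3 ∧
          (j : Int) = 3 * i + (3 - u)) ∨ (i = bs.length ∧ j = 3 * bs.length)) →
      PondInv bs (pondLoopA bs f i use c)
        (let j' := advB (bs.flatMap (fun b => [b, b, b])) f j
         if j' < (bs.flatMap (fun b => [b, b, b])).length then (c + 1, j' + 1) else (c, j')) := by
  intro d
  induction d with
  | zero =>
    intro i c use j hd hinv
    rcases hinv with ⟨p, u, _, _, _, hilt, _, _⟩ | ⟨hi, hj⟩
    · omega
    · exact pond_step_base bs f c use i j hi hj
  | succ d ih =>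
    intro i c use j hd hinv
    rcases hinv with ⟨p, u, hp, hu0, hu3, hilt, huse, hj⟩ | ⟨hi, hj⟩
    · have hlen3 := length_baits3 bs
      have huget : use.getD i 0 = u := by rw [huse, ← hp, getD_append_len]
      have hjnat : j = 3 * i + (3 - u).toNat := by omega
      rw [pondLoopA, dif_pos hilt]
      by_cases hcatch : u > 0 ∧ bs.getD i 0 < f
      · obtain ⟨hupos, hlt⟩ := hcatch
        rw [huget, if_pos hupos, if_pos hlt]
        have hr : (3 - u).toNat < 3 := by omega
        have hjlt : j < (bs.flatMap (fun b => [b, b, b])).length := by omega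
        have hbval : (bs.flatMap (fun b => [b, b, b])).getD j 0 = bs.getD i 0 := by
          rw [hjnat]; exact getD_baits3 bs i _ hilt hr
        have hadv : advB (bs.flatMap (fun b => [b, b, b])) f j = j := by
          rw [advB, dif_pos hjlt, if_neg (by rw [hbval]; exact not_le.mpr hlt)]
        simp only [hadv, if_pos hjlt]
        refine ⟨rfl, Or.inl ⟨p, u - 1, hp, by omega, by omega, hilt, ?_, by push_cast; omega⟩⟩
        simp only [huse, ← hp]
        rw [set_append_len]
      · have hnc : u > 0 → ¬ bs.getD i 0 < f := fun h1 h2 => hcatch ⟨h1, h2⟩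
        have hstep :
            (if use.getD i 0 > 0 then
               if bs.getD i 0 < f then (c + 1, i, use.set i (use.getD i 0 - 1))
               else pondLoopA bs f (i + 1) use c
             else pondLoopA bs f (i + 1) use c) = pondLoopA bs f (i + 1) use c := by
          rw [huget]
          by_cases h1 : u > 0
          · rw [if_pos h1, if_neg (hnc h1)]
          · rw [if_neg h1]
        rw [hstep]
        have hskip : advB (bs.flatMap (fun b => [b, b, b])) f j
            = advB (bs.flatMap (fun b => [b, b, b])) f (3 * (i + 1)) := by
          have h := advB_skip (bs.flatMap (fun b => [b, b, b])) f j u.toNat (by omega)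
            (fun m hm => by
              have hupos : u > 0 := by omega
              have hm3 : (3 - u).toNat + m < 3 := by omega
              have : j + m = 3 * i + ((3 - u).toNat + m) := by omega
              rw [this, getD_baits3 bs i _ hilt hm3]
              exact not_lt.mp (hnc hupos))
          have he : j + u.toNat = 3 * (i + 1) := by omega
          rwa [he] at h
        simp only [hskip]
        apply ih (i + 1) c use (3 * (i + 1)) (by omega)
        by_cases hend : i + 1 < bs.length
        · refine Or.inl ⟨p ++ [u], 3, by simp [hp], by norm_num, le_refl 3, hend, ?_, by push_cast; ring⟩
          have h1 : bs.length - i - 1 = (bs.length - (i + 1) - 1) + 1 := by omega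
          rw [huse, h1, List.replicate_succ]; simp
        · exact Or.inr ⟨by omega, by omega⟩
    · exact pond_step_base bs f c use i j hi hj

lemma pond_step (bs : List Int) (f : Int) :
    ∀ (stA : Int × Nat × List Int) (stB : Int × Nat),
    PondInv bs stA stB →
    PondInv bs (pondLoopA bs f stA.2.1 stA.2.2 stA.1)
      (let j := advB (bs.flatMap (fun b => [b, b, b])) f stB.2
       if j < (bs.flatMap (fun b => [b, b, b])).length then (stB.1 + 1, j + 1) else (stB.1, j)) := by
  rintro ⟨cA, iA, useA⟩ ⟨cB, jB⟩ ⟨hc, hcase⟩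
  simp only at hc
  subst hc
  exact pond_step_aux bs f bs.length iA cA useA jB (by omega) hcase

lemma pond_fold (bs : List Int) (fs : List Int) :
    ∀ (stA : Int × Nat × List Int) (stB : Int × Nat),
    PondInv bs stA stB →
    PondInv bs
      (fs.foldl (fun (st : Int × Nat × List Int) fishSize =>
        pondLoopA bs fishSize st.2.1 st.2.2 st.1) stA)
      (fs.foldl (fun (st : Int × Nat) f =>
        let j := advB (bs.flatMap (fun b => [b, b, b])) f st.2
        if j < (bs.flatMap (fun b => [b, b, b])).length then (st.1 + 1, j + 1) else (st.1, j)) stB) := by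
  intro stA stB hInv
  induction fs generalizing stA stB with
  | nil => exact hInv
  | cons f t ih =>
    simp only [List.foldl_cons]
    exact ih _ _ (pond_step bs f stA stB hInv)

lemma pond_init (bs : List Int) :
    PondInv bs (0, 0, List.replicate bs.length 3) ((0 : Int), 0) := by
  constructor
  · rfl
  · cases bs with
    | nil => right; simp
    | cons b t =>
      left
      exact ⟨[], 3, by simp, by norm_num, by norm_num, by simp,
        by simp [List.replicate_succ], by norm_num⟩

lemma A_eq_ref (fish baits : List Int) : greedyPond fish baits = pondRef fish baits := by
  unfold greedyPond pondRef
  simp only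
  exact (pond_fold (PySem.List.sorted baits (fun x => x) true)
    (PySem.List.sorted fish (fun x => x) true) _ _ (pond_init _)).1

-- ---------- Step 2: pondRef = B ----------
-- cntGe l f = number of leading elements ≥ f; on a descending list, all others are < f.
def cntGe (l : List Int) (f : Int) : Nat := (l.takeWhile (fun b => decide (f ≤ b))).length

lemma cntGe_le_length (l : List Int) (f : Int) : cntGe l f ≤ l.length := by
  unfold cntGe; exact (l.takeWhile_sublist _).length_le

lemma getD_lt_cntGe (l : List Int) (f : Int) (i : Nat) (hi : i < cntGe l f) :
    f ≤ l.getD i 0 := by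
  induction l generalizing i with
  | nil => simp [cntGe] at hi
  | cons a t ih =>
    by_cases ha : f ≤ a
    · cases i with
      | zero => simpa using ha
      | succ i' =>
        have : i' < cntGe t f := by
          simp [cntGe, List.takeWhile_cons, ha] at hi ⊢; omega
        simpa using ih i' this
    · simp [cntGe, List.takeWhile_cons, ha] at hi

lemma getD_ge_cntGe (l : List Int) (f : Int) (hdesc : l.Pairwise (fun a b => b ≤ a))
    (i : Nat) (hi : cntGe l f ≤ i) (hilen : i < l.length) : l.getD i 0 < f := by
  induction l generalizing i with
  | nil => simp at hilen
  | cons a t ih =>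
    rcases List.pairwise_cons.mp hdesc with ⟨hall, ht⟩
    by_cases ha : f ≤ a
    · have hc : cntGe (a :: t) f = cntGe t f + 1 := by
        simp [cntGe, List.takeWhile_cons, ha]
      cases i with
      | zero => omega
      | succ i' =>
        rw [List.getD_cons_succ]
        exact ih ht i' (by omega) (by simpa using hilen)
    · have ha' : a < f := by omega
      cases i with
      | zero => simpa using ha'
      | succ i' =>
        rw [List.getD_cons_succ]
        have hlt : i' < t.length := by simpa using hilen
        have hmem : t.getD i' 0 ∈ t := by
          rw [List.getD_eq_getElem _ _ hlt]; exact List.getElem_mem hlt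
        exact lt_of_le_of_lt (hall _ hmem) ha'

lemma bsearch_eq (bs : List Int) (f : Int) (hdesc : bs.Pairwise (fun a b => b ≤ a)) :
    ∀ (d lo hi : Nat), hi - lo ≤ d → lo ≤ cntGe bs f → cntGe bs f ≤ hi → hi ≤ bs.length →
    bsearchB bs f lo hi = cntGe bs f := by
  intro d
  induction d with
  | zero =>
    intro lo hi hd h1 h2 _
    rw [bsearchB, dif_neg (by omega)]
    omega
  | succ d ih =>
    intro lo hi hd h1 h2 hlen
    by_cases hlh : lo < hi
    · rw [bsearchB, dif_pos hlh]
      simp only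
      set mid := (lo + hi) / 2 with hmid
      have hmlo : lo ≤ mid := by omega
      have hmhi : mid < hi := by omega
      by_cases hge : bs.getD mid 0 ≥ f
      · rw [if_pos hge]
        have : mid < cntGe bs f := by
          by_contra hc
          exact absurd (getD_ge_cntGe bs f hdesc mid (by omega) (by omega)) (by omega)
        exact ih (mid + 1) hi (by omega) (by omega) h2 hlen
      · rw [if_neg hge]
        have : cntGe bs f ≤ mid := by
          by_contra hc
          exact hge (getD_lt_cntGe bs f mid (by omega))
        exact ih lo mid (by omega) h1 this (by omega)
    · rw [bsearchB, dif_neg hlh]; omega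

lemma cntGe_baits3 (bs : List Int) (f : Int) :
    cntGe (bs.flatMap (fun b => [b, b, b])) f = 3 * cntGe bs f := by
  induction bs with
  | nil => simp [cntGe]
  | cons b t ih =>
    by_cases hb : f ≤ b
    · simp [cntGe, List.flatMap_cons, List.takeWhile_cons, hb] at ih ⊢
      omega
    · simp [cntGe, List.flatMap_cons, List.takeWhile_cons, hb]

lemma desc_baits3 (bs : List Int) (hdesc : bs.Pairwise (fun a b => b ≤ a)) :
    (bs.flatMap (fun b => [b, b, b])).Pairwise (fun a b => b ≤ a) := by
  induction bs with
  | nil => simp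
  | cons b t ih =>
    rcases List.pairwise_cons.mp hdesc with ⟨hall, ht⟩
    have hmem : ∀ x ∈ t.flatMap (fun b => [b, b, b]), x ≤ b := by
      intro x hx
      simp only [List.mem_flatMap] at hx
      obtain ⟨y, hy, hxy⟩ := hx
      simp only [List.mem_cons, List.not_mem_nil, or_false] at hxy
      rcases hxy with rfl | rfl | rfl <;> exact hall _ hy
    simp only [List.flatMap_cons, List.cons_append, List.nil_append]
    refine List.pairwise_cons.mpr ⟨?_, List.pairwise_cons.mpr ⟨?_, List.pairwise_cons.mpr ⟨?_, ih ht⟩⟩⟩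
    · intro x hx
      rcases List.mem_cons.mp hx with rfl | hx
      · exact le_refl x
      rcases List.mem_cons.mp hx with rfl | hx
      · exact le_refl x
      exact hmem x hx
    · intro x hx
      rcases List.mem_cons.mp hx with rfl | hx
      · exact le_refl x
      exact hmem x hx
    · exact hmem

-- advB from j lands on max j (3·cntGe bs f) (all earlier positions hold baits ≥ f)
lemma advB_eq_max (bs3 : List Int) (f : Int) (hdesc : bs3.Pairwise (fun a b => b ≤ a)) :
    ∀ (d j : Nat), bs3.length - j ≤ d → j ≤ bs3.length →
    advB bs3 f j = max j (cntGe bs3 f) := by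
  intro d
  induction d with
  | zero =>
    intro j hd hj
    have hj' : j = bs3.length := by omega
    rw [advB, dif_neg (by omega)]
    have := cntGe_le_length bs3 f
    omega
  | succ d ih =>
    intro j hd hj
    by_cases hjl : j < bs3.length
    · rw [advB, dif_pos hjl]
      by_cases hge : bs3.getD j 0 ≥ f
      · rw [if_pos hge]
        have hjc : j < cntGe bs3 f := by
          by_contra hc
          exact absurd (getD_ge_cntGe bs3 f hdesc j (by omega) hjl) (by omega)
        rw [ih (j + 1) (by omega) (by omega)]
        omega
      · rw [if_neg hge]
        have : cntGe bs3 f ≤ j := by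
          by_contra hc
          exact hge (getD_lt_cntGe bs3 f j (by omega))
        omega
    · rw [advB, dif_neg hjl]
      have := cntGe_le_length bs3 f
      omega

-- Invariant between the pointer state (cA, j) and B's state (bound, cB, k)
def HallInv (m3 : Int) (stR : Int × Nat) (stB : Int × Int × Int) : Prop :=
  (stR.1 = stB.2.2 ∧ stB.2.1 = stB.2.2 ∧ 0 ≤ stB.2.2 ∧ stB.2.2 ≤ m3 ∧ stB.2.2 ≤ stB.1 ∧
     (stR.2 : Int) = max stB.2.2 (m3 + stB.2.2 - stB.1) ∧
     (stB.2.2 = 0 → m3 ≤ stB.1) ∧ (1 ≤ stB.2.2 → stB.1 ≤ m3)) ∨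
  ((stR.2 : Int) = m3 ∧ stB.1 < stB.2.2 ∧ stR.1 = stB.2.1)

lemma hall_step (bs : List Int) (hdesc : bs.Pairwise (fun a b => b ≤ a)) (f : Int)
    (stR : Int × Nat) (stB : Int × Int × Int)
    (hInv : HallInv (3 * bs.length) stR stB) :
    HallInv (3 * bs.length)
      (let j := advB (bs.flatMap (fun b => [b, b, b])) f stR.2
       if j < (bs.flatMap (fun b => [b, b, b])).length then (stR.1 + 1, j + 1) else (stR.1, j))
      (let k := stB.2.2 + 1
       let lo := bsearchB bs f 0 bs.length
       let c : Int := (bs.length : Int) - (lo : Int)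
       let bound := min stB.1 (3 * c + k - 1)
       let caught := if k ≤ bound then k else stB.2.1
       (bound, caught, k)) := by
  obtain ⟨bound, cB, k⟩ := stB
  obtain ⟨cR, j⟩ := stR
  have hlen3 := length_baits3 bs
  have hdesc3 := desc_baits3 bs hdesc
  have hcnt3 := cntGe_baits3 bs f
  have hcle := cntGe_le_length bs f
  have hlo : bsearchB bs f 0 bs.length = cntGe bs f :=
    bsearch_eq bs f hdesc bs.length 0 bs.length (by omega) (by omega) hcle (by omega)
  simp only [HallInv, hlo] at hInv ⊢
  rcases hInv with ⟨hcR, hcB, hk0, hkm, hkb, hjeq, hinit, hbm⟩ | ⟨hjm, hdead, hcB⟩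
  · -- alive
    have hsplit : (k = 0 ∧ 3 * (bs.length : Int) ≤ bound) ∨ (1 ≤ k ∧ bound ≤ 3 * (bs.length : Int)) := by
      by_cases hk : k = 0
      · exact Or.inl ⟨hk, hinit hk⟩
      · exact Or.inr ⟨by omega, hbm (by omega)⟩
    have hjle : j ≤ (bs.flatMap (fun b => [b, b, b])).length := by
      rcases hsplit with ⟨h1, h2⟩ | ⟨h1, h2⟩ <;> omega
    have hadv : advB (bs.flatMap (fun b => [b, b, b])) f j
        = max j (cntGe (bs.flatMap (fun b => [b, b, b])) f) :=
      advB_eq_max _ f hdesc3 ((bs.flatMap (fun b => [b, b, b])).length) j (by omega) hjle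
    rw [hadv, hcnt3]
    by_cases hcatch : max j (3 * cntGe bs f) < (bs.flatMap (fun b => [b, b, b])).length
    · rw [if_pos hcatch]
      refine Or.inl ⟨by omega, ?_, by omega, by omega, ?_, ?_, by omega, ?_⟩
      · rw [if_pos (by rcases hsplit with ⟨h1, h2⟩ | ⟨h1, h2⟩ <;> omega)]
      · rcases hsplit with ⟨h1, h2⟩ | ⟨h1, h2⟩ <;> omega
      · push_cast
        rcases hsplit with ⟨h1, h2⟩ | ⟨h1, h2⟩ <;> omega
      · intro _
        rcases hsplit with ⟨h1, h2⟩ | ⟨h1, h2⟩ <;> omega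
    · rw [if_neg hcatch]
      have hdeadC : min bound (3 * ((bs.length : Int) - (cntGe bs f : Int)) + (k + 1) - 1) < k + 1 := by
        rcases hsplit with ⟨h1, h2⟩ | ⟨h1, h2⟩ <;> omega
      refine Or.inr ⟨?_, hdeadC, ?_⟩
      · push_cast
        rcases hsplit with ⟨h1, h2⟩ | ⟨h1, h2⟩ <;> omega
      · rw [if_neg (by omega)]
        omega
  · -- dead
    have hjlen : j = (bs.flatMap (fun b => [b, b, b])).length := by omega
    have hadv : advB (bs.flatMap (fun b => [b, b, b])) f j
        = max j (cntGe (bs.flatMap (fun b => [b, b, b])) f) :=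
      advB_eq_max _ f hdesc3 ((bs.flatMap (fun b => [b, b, b])).length) j (by omega) (by omega)
    rw [hadv, hcnt3]
    rw [if_neg (by omega)]
    refine Or.inr ⟨by push_cast; omega, by omega, ?_⟩
    rw [if_neg (by omega)]
    exact hcB

lemma hall_fold (bs : List Int) (hdesc : bs.Pairwise (fun a b => b ≤ a)) (fs : List Int) :
    ∀ (stR : Int × Nat) (stB : Int × Int × Int),
    HallInv (3 * bs.length) stR stB →
    HallInv (3 * bs.length)
      (fs.foldl (fun (st : Int × Nat) f =>
        let j := advB (bs.flatMap (fun b => [b, b, b])) f st.2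
        if j < (bs.flatMap (fun b => [b, b, b])).length then (st.1 + 1, j + 1) else (st.1, j)) stR)
      (fs.foldl (fun (st : Int × Int × Int) f =>
        let k := st.2.2 + 1
        let lo := bsearchB bs f 0 bs.length
        let c : Int := (bs.length : Int) - (lo : Int)
        let bound := min st.1 (3 * c + k - 1)
        let caught := if k ≤ bound then k else st.2.1
        (bound, caught, k)) stB) := by
  intro stR stB hInv
  induction fs generalizing stR stB with
  | nil => exact hInv
  | cons f t ih =>
    simp only [List.foldl_cons]
    exact ih _ _ (hall_step bs hdesc f stR stB hInv)

lemma ref_eq_alt (fish baits : List Int) : pondRef fish baits = greedyPond_alt fish baits := by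
  unfold pondRef greedyPond_alt
  simp only
  set bs := PySem.List.sorted baits (fun x => x) true with hbs
  set fs := PySem.List.sorted fish (fun x => x) true with hfs
  have hdesc : bs.Pairwise (fun a b => b ≤ a) := PySem.List.sorted_pairwise_rev baits (fun x => x)
  have hInv0 : HallInv (3 * bs.length) ((0 : Int), (0 : Nat))
      ((3 * (bs.length : Int) + (fs.length : Int)), 0, 0) := by
    unfold HallInv
    dsimp only
    refine Or.inl ⟨rfl, rfl, le_refl _, by omega, by omega, by push_cast; omega, by omega, by omega⟩
  have := hall_fold bs hdesc fs _ _ hInv0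
  rcases this with ⟨h1, h2, _⟩ | ⟨_, _, h3⟩
  · rw [h1, h2]
  · rw [h3]

-- ===== VERDICT (by name: the statement is the Claim_ definition above) =====
theorem greedyPond_spec : Claim_equal_greedyPond := by
  intro fish baits _
  unfold Spec_greedyPond
  rw [A_eq_ref, ref_eq_alt]
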